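-- pv_equiv track=rewrite | github.com/MauzM/Mastermind | LuckyLuke & OptimizePrime_Mastermind.py | check
-- ===== SOURCE A (Python) =====
-- def check(permutation1, permutation2):
--    """ This function calculates the number of rightly_positioned and right_colour
--    given two permutations. This is basically what the user does, if he is playing
--    the game as codemaker """
--    right_positioned = 0
--    right_colour = 0
--    for i in range(len(permutation1)):
--       if permutation1[i] == permutation2[i]:
--           right_positioned += 1
--       else:
--          if permutation1[i] in permutation2:
--              right_colour += 1
--    return [right_positioned, right_colour]
-- ===== SOURCE B (Python) =====
-- def check(permutation1, permutation2):
--     right_positioned = sum(a == b for a, b in zip(permutation1, permutation2))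
--     # sort-merge join: count elements of permutation1 whose value occurs in permutation2
--     s1 = sorted(permutation1)
--     s2 = sorted(permutation2)
--     present = 0
--     j = 0
--     for x in s1:
--         while j < len(s2) and s2[j] < x:
--             j += 1
--         if j < len(s2) and s2[j] == x:
--             present += 1
--     return [right_positioned, present - right_positioned]
-- ===== Notes on version B (the rewrite author's own statement) =====
-- stated objective: faster
-- what changed: Replaced A's indexed loop with a nested linear membership scan by a zip pass for exact matches plus a sort-merge join (sort both lists, one two-pointer sweep) counting colour presences, combined by right_colour = present - right_positioned.
import Mathlib
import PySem

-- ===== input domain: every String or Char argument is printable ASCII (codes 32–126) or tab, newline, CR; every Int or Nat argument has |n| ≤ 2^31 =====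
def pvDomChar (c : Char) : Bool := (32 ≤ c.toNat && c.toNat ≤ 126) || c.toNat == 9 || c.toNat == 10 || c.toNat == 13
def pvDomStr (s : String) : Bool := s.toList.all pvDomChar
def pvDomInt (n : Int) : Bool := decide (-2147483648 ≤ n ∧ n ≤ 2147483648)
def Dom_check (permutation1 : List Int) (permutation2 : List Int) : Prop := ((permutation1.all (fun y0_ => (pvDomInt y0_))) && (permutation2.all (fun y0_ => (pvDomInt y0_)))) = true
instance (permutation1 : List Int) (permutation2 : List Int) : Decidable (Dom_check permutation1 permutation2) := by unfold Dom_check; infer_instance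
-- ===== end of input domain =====

-- B replaces A's indexed loop with nested membership scan by a zip pass for exact
-- matches plus a sort-merge join for colour presences; measurably faster asymptotics.


-- ===== PORT A =====
def check (permutation1 : List Int) (permutation2 : List Int) : List Int :=
  let s := (PySem.List.pyRange 0 (permutation1.length : Int) 1).foldl
    (fun (s : Int × Int) i =>
      if PySem.List.pyGetD permutation1 i 0 = PySem.List.pyGetD permutation2 i 0 then
        (s.1 + 1, s.2)
      else if PySem.List.pyGetD permutation1 i 0 ∈ permutation2 then (s.1, s.2 + 1)
      else s)
    (0, 0)
  [s.1, s.2]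

-- ===== PORT B =====
-- the inner 'while j < len(s2) and s2[j] < x: j += 1' loop of Source B
-- (fuel = s2.length - j only makes the while loop total; it never changes the result)
def pvAdvanceGo (s2 : List Int) (x : Int) : Nat → Nat → Nat
  | 0, j => j
  | fuel + 1, j =>
    if j < s2.length then
      if s2.getD j 0 < x then pvAdvanceGo s2 x fuel (j + 1) else j
    else j

def pvAdvance (s2 : List Int) (x : Int) (j : Nat) : Nat :=
  pvAdvanceGo s2 x (s2.length - j) j

def check_alt (permutation1 : List Int) (permutation2 : List Int) : List Int :=
  let rightPositioned : Int :=
    (((permutation1.zip permutation2).countP (fun q => q.1 == q.2)) : Int)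
  let s1 := PySem.List.sorted permutation1 (fun x => x) false
  let s2 := PySem.List.sorted permutation2 (fun x => x) false
  let st := s1.foldl
    (fun (st : Int × Nat) x =>
      let j := pvAdvance s2 x st.2
      if j < s2.length then
        if s2.getD j 0 = x then (st.1 + 1, j) else (st.1, j)
      else (st.1, j))
    (0, 0)
  [rightPositioned, st.1 - rightPositioned]

-- ===== PRECONDITION & SPEC =====
-- Pre_ excludes only the inputs where permutation2 is shorter than permutation1:
-- there A raises IndexError at the first out-of-range index.
def Pre_check (permutation1 : List Int) (permutation2 : List Int) : Prop :=
  permutation1.length ≤ permutation2.length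
instance (permutation1 : List Int) (permutation2 : List Int) : Decidable (Pre_check permutation1 permutation2) := by unfold Pre_check; infer_instance
def pvWitness_check : List Int × List Int := ([1, 2, 3], [1, 3, 2])

def Spec_check (permutation1 : List Int) (permutation2 : List Int) (out : List Int) : Prop := out = check_alt permutation1 permutation2
instance (permutation1 : List Int) (permutation2 : List Int) (out : List Int) : Decidable (Spec_check permutation1 permutation2 out) := by unfold Spec_check; infer_instance

-- ===== CLAIM (what is proved, stated in full; the proofs are below) =====
def Claim_equal_check : Prop := ∀ (permutation1 : List Int) (permutation2 : List Int), Dom_check permutation1 permutation2 → Pre_check permutation1 permutation2 → Spec_check permutation1 permutation2 (check permutation1 permutation2)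

-- ===== LEMMAS AND PROOFS =====

-- range(0, n) over Int is the cast of List.range n.
theorem pyRange_cast (n : Nat) :
    PySem.List.pyRange 0 (n : Int) 1 = (List.range n).map (fun (k : Nat) => (k : Int)) := by
  rw [PySem.List.pyRange_one]
  simp only [Int.sub_zero, Int.toNat_natCast, zero_add]

-- A's loop, read over the zipped lists: the accumulator gains (exact matches, colour-only matches).
theorem check_fold_zip (m : List Int) :
    ∀ (p1 p2 : List Int) (a b : Int), p1.length ≤ p2.length →
    (List.range p1.length).foldl
      (fun (s : Int × Int) k =>
        if p1.getD k 0 = p2.getD k 0 then (s.1 + 1, s.2)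
        else if p1.getD k 0 ∈ m then (s.1, s.2 + 1)
        else s) (a, b)
    = (a + ((p1.zip p2).countP (fun q => q.1 == q.2) : Int),
       b + ((p1.zip p2).countP (fun q => !(q.1 == q.2) && decide (q.1 ∈ m)) : Int)) := by
  intro p1
  induction p1 with
  | nil => intro p2 a b _; simp
  | cons x t1 ih =>
    intro p2 a b h
    cases p2 with
    | nil => simp at h
    | cons y t2 =>
      rw [List.length_cons, List.range_succ_eq_map]
      simp only [List.foldl_cons, List.foldl_map, List.getD_cons_zero, List.getD_cons_succ]
      by_cases hxy : x = y
      · rw [if_pos hxy]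
        rw [ih t2 (a + 1) b (by simpa using h)]
        simp [hxy]
        omega
      · rw [if_neg hxy]
        by_cases hm : x ∈ m
        · rw [if_pos hm]
          rw [ih t2 a (b + 1) (by simpa using h)]
          simp [hxy, hm]
          omega
        · rw [if_neg hm]
          rw [ih t2 a b (by simpa using h)]
          simp [hxy, hm]

-- B's membership count, read over the zipped lists (membership list m held fixed).
theorem present_zip (m : List Int) :
    ∀ (p1 p2 : List Int), p1.length ≤ p2.length →
    p1.countP (fun x => decide (x ∈ m))
    = (p1.zip p2).countP (fun q => decide (q.1 ∈ m)) := by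
  intro p1
  induction p1 with
  | nil => intro p2 _; simp
  | cons x t1 ih =>
    intro p2 h
    cases p2 with
    | nil => simp at h
    | cons y t2 =>
      rw [List.countP_cons, List.zip_cons_cons, List.countP_cons, ih t2 (by simpa using h)]

-- Split 'first component present in p2' into exact and colour-only matches,
-- valid because every second component of the zip lies in p2.
theorem count_split (p2 : List Int) :
    ∀ (l : List (Int × Int)), (∀ q ∈ l, q.2 ∈ p2) →
    (l.countP (fun q => decide (q.1 ∈ p2)) : Int)
    = (l.countP (fun q => q.1 == q.2) : Int)
      + (l.countP (fun q => !(q.1 == q.2) && decide (q.1 ∈ p2)) : Int) := by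
  intro l
  induction l with
  | nil => intro _; simp
  | cons q t ih =>
    intro hq
    have ht : ∀ r ∈ t, r.2 ∈ p2 := fun r hr => hq r (List.mem_cons_of_mem _ hr)
    have h2 : q.2 ∈ p2 := hq q (List.mem_cons_self ..)
    simp only [List.countP_cons]
    by_cases he : q.1 = q.2
    · simp [he, h2, ih ht]
      omega
    · by_cases hm : q.1 ∈ p2
      · simp [he, hm, ih ht]
        omega
      · simp [he, hm, ih ht]

-- Suffix reading of B's merge loop (proof-side model).
def mergeLoop : List Int → List Int → Int → Int
  | [], _, acc => acc
  | x :: xs, t, acc =>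
    match t.dropWhile (fun y => decide (y < x)) with
    | y :: ys => if y = x then mergeLoop xs (y :: ys) (acc + 1) else mergeLoop xs (y :: ys) acc
    | [] => mergeLoop xs [] acc

-- the while loop moves the pointer exactly past the (< x)-prefix of the current suffix.
theorem advance_go_drop (s2 : List Int) (x : Int) :
    ∀ fuel j, s2.length ≤ j + fuel → j ≤ s2.length →
    s2.drop (pvAdvanceGo s2 x fuel j) = (s2.drop j).dropWhile (fun y => decide (y < x))
      ∧ pvAdvanceGo s2 x fuel j ≤ s2.length := by
  intro fuel
  induction fuel with
  | zero =>
    intro j h1 h2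
    have hj : j = s2.length := by omega
    subst hj
    simp [pvAdvanceGo]
  | succ f ih =>
    intro j h1 h2
    by_cases hj : j < s2.length
    · have hdrop : s2.drop j = s2[j] :: s2.drop (j + 1) := List.drop_eq_getElem_cons hj
      have hget : s2.getD j 0 = s2[j] := List.getD_eq_getElem s2 0 hj
      by_cases hlt : s2.getD j 0 < x
      · have := ih (j + 1) (by omega) (by omega)
        refine ⟨?_, ?_⟩
        · show s2.drop (pvAdvanceGo s2 x (f + 1) j) = _
          rw [pvAdvanceGo, if_pos hj, if_pos hlt, this.1, hdrop, List.dropWhile_cons]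
          have hlt' : s2[j] < x := by rw [← hget]; exact hlt
          simp [hlt']
        · rw [pvAdvanceGo, if_pos hj, if_pos hlt]; exact this.2
      · refine ⟨?_, ?_⟩
        · rw [pvAdvanceGo, if_pos hj, if_neg hlt, hdrop, List.dropWhile_cons]
          have hlt' : ¬ s2[j] < x := by rw [← hget]; exact hlt
          rw [if_neg (by simpa using hlt')]
        · rw [pvAdvanceGo, if_pos hj, if_neg hlt]; omega
    · have hj' : j = s2.length := by omega
      subst hj'
      simp [pvAdvanceGo]

-- B's index loop equals the suffix merge loop.
theorem fold_eq_mergeLoop (s2 : List Int) :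
    ∀ (s1 : List Int) (acc : Int) (j : Nat), j ≤ s2.length →
    (s1.foldl
      (fun (st : Int × Nat) x =>
        let j := pvAdvance s2 x st.2
        if j < s2.length then
          if s2.getD j 0 = x then (st.1 + 1, j) else (st.1, j)
        else (st.1, j))
      (acc, j)).1 = mergeLoop s1 (s2.drop j) acc := by
  intro s1
  induction s1 with
  | nil => intro acc j _; simp [mergeLoop]
  | cons x xs ih =>
    intro acc j hj
    have hadv := advance_go_drop s2 x (s2.length - j) j (by omega) hj
    have hdropj' : s2.drop (pvAdvance s2 x j) = (s2.drop j).dropWhile (fun y => decide (y < x)) :=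
      hadv.1
    have hj'le : pvAdvance s2 x j ≤ s2.length := hadv.2
    cases hdw : (s2.drop j).dropWhile (fun y => decide (y < x)) with
    | nil =>
      have hnil : s2.drop (pvAdvance s2 x j) = [] := by rw [hdropj', hdw]
      have hlt : ¬ pvAdvance s2 x j < s2.length := by
        have hlen := congrArg List.length hnil
        simp at hlen
        omega
      simp only [List.foldl_cons, mergeLoop, hdw]
      rw [if_neg hlt, ih acc _ hj'le, hnil]
    | cons y ys =>
      have hcons : s2.drop (pvAdvance s2 x j) = y :: ys := by rw [hdropj', hdw]
      have hlt : pvAdvance s2 x j < s2.length := by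
        have hlen := congrArg List.length hcons
        simp at hlen
        omega
      have hge : s2.drop (pvAdvance s2 x j)
          = s2[pvAdvance s2 x j] :: s2.drop (pvAdvance s2 x j + 1) :=
        List.drop_eq_getElem_cons hlt
      have hy : s2[pvAdvance s2 x j]'hlt = y := by
        rw [hge] at hcons
        exact (List.cons_eq_cons.mp hcons).1
      have hgetD : s2.getD (pvAdvance s2 x j) 0 = y := by
        rw [List.getD_eq_getElem s2 0 hlt, hy]
      simp only [List.foldl_cons, mergeLoop, hdw]
      rw [if_pos hlt, hgetD]
      by_cases heq : y = x
      · rw [if_pos heq, if_pos heq, ih (acc + 1) _ hj'le, hcons]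
      · rw [if_neg heq, if_neg heq, ih acc _ hj'le, hcons]

-- sort-merge correctness: the merge loop counts membership in the sorted list.
theorem mergeLoop_count :
    ∀ (s1 t : List Int) (acc : Int), s1.Pairwise (· ≤ ·) → t.Pairwise (· ≤ ·) →
    mergeLoop s1 t acc = acc + (s1.countP (fun x => decide (x ∈ t)) : Int) := by
  intro s1
  induction s1 with
  | nil => intro t acc _ _; simp [mergeLoop]
  | cons x xs ih =>
    intro t acc hp1 hpt
    have hx_le : ∀ x' ∈ xs, x ≤ x' := (List.pairwise_cons.mp hp1).1
    have hp1' : xs.Pairwise (· ≤ ·) := (List.pairwise_cons.mp hp1).2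
    have hsplit : t.takeWhile (fun y => decide (y < x)) ++ t.dropWhile (fun y => decide (y < x)) = t :=
      List.takeWhile_append_dropWhile
    have htake_lt : ∀ y ∈ t.takeWhile (fun y => decide (y < x)), y < x := by
      intro y hy
      simpa using List.mem_takeWhile_imp hy
    have hpt' : (t.dropWhile (fun y => decide (y < x))).Pairwise (· ≤ ·) :=
      hpt.sublist (List.dropWhile_sublist _)
    have hmem : ∀ z : Int, x ≤ z →
        (z ∈ t ↔ z ∈ t.dropWhile (fun y => decide (y < x))) := by
      intro z hz
      constructor
      · intro h
        rw [← hsplit] at h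
        rcases List.mem_append.mp h with h | h
        · exact absurd (htake_lt z h) (by omega)
        · exact h
      · intro h
        rw [← hsplit]
        exact List.mem_append.mpr (Or.inr h)
    have hcount : xs.countP (fun z => decide (z ∈ t))
        = xs.countP (fun z => decide (z ∈ t.dropWhile (fun y => decide (y < x)))) := by
      apply List.countP_congr
      intro z hz
      simp [hmem z (hx_le z hz)]
    cases hdw : t.dropWhile (fun y => decide (y < x)) with
    | nil =>
      simp only [mergeLoop, hdw]
      have hxnot : x ∉ t := by
        intro h
        have := (hmem x le_rfl).mp h
        rw [hdw] at this
        simp at this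
      rw [ih [] acc hp1' List.Pairwise.nil]
      rw [List.countP_cons]
      simp only [hxnot, decide_false]
      rw [hcount, hdw]
      simp
    | cons y ys =>
      have hy_le_all : ∀ z ∈ ys, y ≤ z := by
        have := hpt'
        rw [hdw] at this
        exact (List.pairwise_cons.mp this).1
      have hx_le_y : x ≤ y := by
        have hne : t.dropWhile (fun y => decide (y < x)) ≠ [] := by rw [hdw]; simp
        have h := List.head_dropWhile_not (fun y => decide (y < x)) hne
        rw [show ((t.dropWhile (fun y => decide (y < x))).head hne) = y by
          simp [hdw]] at h
        simpa using h
      have hxmem : x ∈ t ↔ y = x := by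
        rw [hmem x le_rfl, hdw]
        constructor
        · intro h
          rcases List.mem_cons.mp h with h | h
          · omega
          · have := hy_le_all x h
            omega
        · intro h; rw [h]; exact List.mem_cons_self ..
      have hps : (y :: ys).Pairwise (fun a b : Int => a ≤ b) := by rw [← hdw]; exact hpt'
      simp only [mergeLoop, hdw]
      by_cases hyx : y = x
      · rw [if_pos hyx, ih (y :: ys) (acc + 1) hp1' hps]
        rw [List.countP_cons]
        simp only [hxmem.mpr hyx, decide_true]
        rw [hcount, hdw]
        push_cast
        ring
      · rw [if_neg hyx, ih (y :: ys) acc hp1' hps]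
        rw [List.countP_cons]
        have hxn : x ∉ t := fun h => hyx (hxmem.mp h)
        simp only [hxn, decide_false]
        rw [hcount, hdw]
        simp

-- ===== VERDICT (by name: the statement is the Claim_ definition above) =====
theorem check_spec : Claim_equal_check := by
  intro p1 p2 _ hpre
  unfold Spec_check check check_alt
  rw [pyRange_cast p1.length, List.foldl_map]
  simp only [PySem.List.pyGetD_natCast]
  rw [check_fold_zip p2 p1 p2 0 0 hpre]
  have hfold := fold_eq_mergeLoop (PySem.List.sorted p2 (fun x => x) false)
    (PySem.List.sorted p1 (fun x => x) false) 0 0 (Nat.zero_le _)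
  rw [List.drop_zero] at hfold
  have hs1p : (PySem.List.sorted p1 (fun x => x) false).Pairwise (· ≤ ·) := by
    simpa using PySem.List.sorted_pairwise p1 (fun x => x)
  have hs2p : (PySem.List.sorted p2 (fun x => x) false).Pairwise (· ≤ ·) := by
    simpa using PySem.List.sorted_pairwise p2 (fun x => x)
  have hcnt := mergeLoop_count (PySem.List.sorted p1 (fun x => x) false)
    (PySem.List.sorted p2 (fun x => x) false) 0 hs1p hs2p
  have hperm1 : (PySem.List.sorted p1 (fun x => x) false).Perm p1 :=
    PySem.List.sorted_perm p1 (fun x => x) false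
  have hpres : (PySem.List.sorted p1 (fun x => x) false).countP
      (fun x => decide (x ∈ PySem.List.sorted p2 (fun x => x) false))
      = p1.countP (fun x => decide (x ∈ p2)) := by
    rw [show (fun x : Int => decide (x ∈ PySem.List.sorted p2 (fun x => x) false))
        = (fun x : Int => decide (x ∈ p2)) from funext (fun x => by
          simp [PySem.List.mem_sorted])]
    exact hperm1.countP_eq _
  rw [hcnt, hpres] at hfold
  rw [hfold]
  have hzip := present_zip p2 p1 p2 hpre
  have hsplit := count_split p2 (p1.zip p2) (fun q hq => (List.of_mem_zip hq).2)
  simp only [zero_add, List.cons.injEq, and_true]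
  constructor
  · trivial
  · rw [hzip, hsplit]
    ring
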